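-- pv_equiv track=rewrite | github.com/JSK-KML/CP125-Class-Repo | labs/lab05/exercise3/exercise3.py | find_bottleneck_index
-- ===== SOURCE A (Python) =====
-- def find_bottleneck_index(traceroute):
--     max_latency = bottleneck_index = 0
--     for i in range(len(traceroute)):
--         prev_hop, prev_latency = traceroute[i - 1]
--         curr_hop, curr_latency = traceroute[i]
--         difference = curr_latency - prev_latency
--         if difference > max_latency:
--             max_latency = difference
--             bottleneck_index = i - 1
--     return bottleneck_index
-- ===== SOURCE B (Python) =====
-- def find_bottleneck_index(traceroute):
--     if not traceroute:
--         return 0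
--     diffs = [traceroute[i][1] - traceroute[i - 1][1] for i in range(len(traceroute))]
--     best = max(diffs)
--     if best <= 0:
--         return 0
--     return diffs.index(best) - 1
-- ===== Notes on version B (the rewrite author's own statement) =====
-- stated objective: alternative
-- what changed: Replaced the single running-max loop carrying (max_latency, bottleneck_index) state by a build-then-locate shape: materialise the full list of wraparound consecutive differences, take its max with the builtin, and recover the answer with first-occurrence .index.
import Mathlib
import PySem

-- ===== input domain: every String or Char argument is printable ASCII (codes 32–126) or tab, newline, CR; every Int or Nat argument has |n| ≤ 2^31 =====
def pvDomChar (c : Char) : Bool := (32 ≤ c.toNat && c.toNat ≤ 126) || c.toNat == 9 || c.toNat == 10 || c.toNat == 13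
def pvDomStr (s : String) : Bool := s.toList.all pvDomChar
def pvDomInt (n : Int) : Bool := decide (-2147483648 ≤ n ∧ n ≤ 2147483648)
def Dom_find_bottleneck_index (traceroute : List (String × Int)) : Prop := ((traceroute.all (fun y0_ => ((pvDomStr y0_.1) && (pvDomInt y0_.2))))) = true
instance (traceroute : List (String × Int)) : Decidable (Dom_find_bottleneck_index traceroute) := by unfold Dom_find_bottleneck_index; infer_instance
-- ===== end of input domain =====

-- B replaces A's single running-max loop over (max_latency, bottleneck_index) state by a
-- build-then-locate decomposition: materialise the list of consecutive differences, take its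
-- max, and find the first index of that max (objective: alternative, same O(n) cost).

-- ===== PORT A =====
-- pyGetD is exact here: the loop indices i and i-1 always satisfy Raise.InRange
-- (i ∈ [0, len) and i-1 ∈ [-1, len), and the range is empty when the list is).
def find_bottleneck_index (traceroute : List (String × Int)) : Int :=
  ((PySem.List.pyRange 0 (traceroute.length : Int) 1).foldl
    (fun (st : Int × Int) (i : Int) =>
      let prev := PySem.List.pyGetD traceroute (i - 1) ("", 0)
      let curr := PySem.List.pyGetD traceroute i ("", 0)
      let difference := curr.2 - prev.2
      if st.1 < difference then (difference, i - 1) else st)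
    (0, 0)).2

-- ===== PORT B =====
def find_bottleneck_index_alt (traceroute : List (String × Int)) : Int :=
  if traceroute = [] then 0
  else
    let diffs := (PySem.List.pyRange 0 (traceroute.length : Int) 1).map
      (fun (i : Int) =>
        (PySem.List.pyGetD traceroute i ("", 0)).2 - (PySem.List.pyGetD traceroute (i - 1) ("", 0)).2)
    let best := (PySem.List.max? diffs (fun y => y)).getD 0
    if best ≤ 0 then 0
    else (((PySem.List.index? diffs best).getD 0 : Nat) : Int) - 1

-- ===== PRECONDITION & SPEC =====
def Spec_find_bottleneck_index (traceroute : List (String × Int)) (out : Int) : Prop := out = find_bottleneck_index_alt traceroute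
instance (traceroute : List (String × Int)) (out : Int) : Decidable (Spec_find_bottleneck_index traceroute out) := by unfold Spec_find_bottleneck_index; infer_instance

-- ===== CLAIM (what is proved, stated in full; the proofs are below) =====
def Claim_equal_find_bottleneck_index : Prop := ∀ (traceroute : List (String × Int)), Dom_find_bottleneck_index traceroute → Spec_find_bottleneck_index traceroute (find_bottleneck_index traceroute)

-- ===== LEMMAS AND PROOFS =====

theorem pv_foldl_max_init (t : List Int) : ∀ a b : Int, t.foldl max (max a b) = max a (t.foldl max b) := by
  induction t with
  | nil => intro a b; simp
  | cons c t ih =>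
    intro a b
    simp only [List.foldl_cons, max_assoc]
    exact ih a (max b c)

theorem pv_fold_pairs (ps : List (Int × Int)) : ∀ m b : Int,
    ps.foldl (fun (st : Int × Int) (p : Int × Int) => if st.1 < p.2 then (p.2, p.1 - 1) else st) (m, b)
    = ((ps.map Prod.snd).foldl max m,
       if m < (ps.map Prod.snd).foldl max m
       then ((ps.find? (fun p => decide (p.2 = (ps.map Prod.snd).foldl max m))).getD (0, 0)).1 - 1
       else b) := by
  induction ps with
  | nil => intro m b; simp
  | cons p t ih =>
    intro m b
    simp only [List.foldl_cons, List.map_cons, List.find?_cons]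
    by_cases h : m < p.2
    · rw [if_pos h]
      have hmax : max m p.2 = p.2 := max_eq_right (le_of_lt h)
      simp only [hmax]
      rw [ih p.2 (p.1 - 1)]
      have hle : p.2 ≤ (t.map Prod.snd).foldl max p.2 := (PySem.List.le_foldl_max (t.map Prod.snd) p.2).1
      have hm : m < (t.map Prod.snd).foldl max p.2 := lt_of_lt_of_le h hle
      rw [if_pos hm]
      by_cases he : p.2 = (t.map Prod.snd).foldl max p.2
      · simp [← he]
      · have hlt : p.2 < (t.map Prod.snd).foldl max p.2 := lt_of_le_of_ne hle he
        rw [if_pos hlt]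
        simp [he]
    · rw [if_neg h]
      have hmax : max m p.2 = m := max_eq_left (by omega)
      simp only [hmax]
      rw [ih m b]
      by_cases hm : m < (t.map Prod.snd).foldl max m
      · have hne : ¬ (p.2 = (t.map Prod.snd).foldl max m) := by omega
        simp [hm, hne]
      · simp [hm]

theorem pv_find_vs_idx (l : List Int) (f : Int → Int) (M : Int) :
    M ∈ l.map f →
    ∃ k, ∃ hk : k < l.length, (l.map f).idxOf? M = some k ∧
      (l.map (fun i => (i, f i))).find? (fun p => decide (p.2 = M)) = some (l[k], M) := by
  induction l with
  | nil => intro h; simp at h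
  | cons i t ih =>
    intro hM
    by_cases h : f i = M
    · refine ⟨0, by simp, ?_, ?_⟩
      · simp [List.idxOf?_cons, h]
      · simp [h]
    · have hM' : M ∈ t.map f := by
        simp only [List.map_cons, List.mem_cons] at hM
        exact hM.resolve_left (fun he => h he.symm)
      obtain ⟨k, hk, hidx, hfind⟩ := ih hM'
      refine ⟨k + 1, by simpa using Nat.succ_lt_succ hk, ?_, ?_⟩
      · simp [List.idxOf?_cons, h, hidx]
      · simp only [List.map_cons, List.find?_cons, h]
        simpa [h] using hfind

-- ===== VERDICT (by name: the statement is the Claim_ definition above) =====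
theorem find_bottleneck_index_spec : Claim_equal_find_bottleneck_index := by
  intro t _
  unfold Spec_find_bottleneck_index find_bottleneck_index find_bottleneck_index_alt
  rcases ht : t with _ | ⟨x, rest⟩
  · simp
  · rw [if_neg (by simp)]
    clear ht
    set f : Int → Int := fun i =>
      (PySem.List.pyGetD (x :: rest) i ("", 0)).2 - (PySem.List.pyGetD (x :: rest) (i - 1) ("", 0)).2 with hf
    set rng := PySem.List.pyRange 0 ((x :: rest).length : Int) 1 with hrng
    -- A's fold over indices = fold over (index, diff) pairs
    have hA : (rng.foldl
        (fun (st : Int × Int) (i : Int) =>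
          let prev := PySem.List.pyGetD (x :: rest) (i - 1) ("", 0)
          let curr := PySem.List.pyGetD (x :: rest) i ("", 0)
          let difference := curr.2 - prev.2
          if st.1 < difference then (difference, i - 1) else st) (0, 0))
        = ((rng.map (fun i => (i, f i))).foldl
            (fun (st : Int × Int) (p : Int × Int) => if st.1 < p.2 then (p.2, p.1 - 1) else st) (0, 0)) := by
      rw [List.foldl_map]
    rw [hA, pv_fold_pairs]
    have hsnd : (rng.map (fun i => (i, f i))).map Prod.snd = rng.map f := by
      simp [List.map_map]
    rw [hsnd]
    -- diffs is nonempty: rng = 0 :: pyRange 1 len 1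
    have hlen : (0 : Int) < ((x :: rest).length : Int) := by simp
    have hcons : rng = 0 :: PySem.List.pyRange 1 ((x :: rest).length : Int) 1 := by
      rw [hrng, PySem.List.pyRange_one_cons hlen]; norm_num
    set tl := (PySem.List.pyRange 1 ((x :: rest).length : Int) 1).map f with htl
    have hdiffs : rng.map f = f 0 :: tl := by rw [hcons]; simp [htl]
    set best := tl.foldl max (f 0) with hbest
    have hmax? : (PySem.List.max? (rng.map f) (fun y => y)).getD 0 = best := by
      rw [hdiffs, PySem.List.max?_id_cons]; rfl
    have hM : (rng.map f).foldl max 0 = max 0 best := by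
      rw [hdiffs]
      simp only [List.foldl_cons]
      exact pv_foldl_max_init tl 0 (f 0)
    dsimp only
    rw [hM, hmax?]
    by_cases hb : best ≤ 0
    · rw [if_neg (by omega), if_pos hb]
    · rw [if_pos (by omega), if_neg hb]
      have hmem : best ∈ rng.map f := by
        rw [hdiffs]
        rcases PySem.List.foldl_max_mem tl (f 0) with h | h
        · rw [hbest, h]; exact List.mem_cons_self
        · exact List.mem_cons_of_mem _ h
      have hMeq : max 0 best = best := max_eq_right (by omega)
      rw [hMeq]
      obtain ⟨k, hk, hidx, hfind⟩ := pv_find_vs_idx rng f best hmem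
      rw [hfind, PySem.List.index?_eq_idxOf?, hidx]
      simp only [Option.getD_some]
      have : rng[k] = (k : Int) := by
        have h2 := PySem.List.getElem_pyRange_one 0 ((x :: rest).length : Int) k
          (by simpa [hrng] using hk)
        rw [zero_add] at h2
        exact h2
      rw [this]
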